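-- pv_equiv track=rewrite | github.com/KardelRuveyda/uretken-yapayzeka-chatbot-gelistirme-temelleri | homeworks/ytu/Ahmet_Furkan_Karslı/sifre_kirici.py | sifreCoz
-- ===== SOURCE A (Python) =====
-- def sifreCoz(mesaj):
--  sonuc = ""
--  i = 0
--  while i < len(mesaj):
--   karakter = mesaj[i]
--   if karakter.isalpha():
--    sonuc += chr((ord(karakter) - ord('a') - 5) % 26 + ord('a'))
--    i += 1
--   elif karakter.isdigit():
--    sayi = ""
--    while i < len(mesaj) and mesaj[i].isdigit():
--     sayi += mesaj[i]
--     i += 1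
--    sonuc += sayi[::-1]
--   else:
--    sonuc += karakter
--    i += 1
--  return sonuc
-- ===== SOURCE B (Python) =====
-- def sifreCoz(mesaj):
--     parcalar = []
--     rakamlar = []
--     for karakter in mesaj:
--         if karakter.isdigit():
--             rakamlar.append(karakter)
--         else:
--             if rakamlar:
--                 parcalar.extend(reversed(rakamlar))
--                 rakamlar = []
--             if karakter.isalpha():
--                 parcalar.append(chr((ord(karakter) - ord('a') - 5) % 26 + ord('a')))
--             else:
--                 parcalar.append(karakter)
--     parcalar.extend(reversed(rakamlar))
--     return ''.join(parcalar)
-- ===== Notes on version B (the rewrite author's own statement) =====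
-- stated objective: faster
-- what changed: Replaces the manual index cursor with its nested digit-collecting while-loop and quadratic string += concatenation by a single buffered for-each pass: digits go into a run buffer flushed reversed when a non-digit arrives (and once at the end), and the pieces are joined once at the end.
import Mathlib
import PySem

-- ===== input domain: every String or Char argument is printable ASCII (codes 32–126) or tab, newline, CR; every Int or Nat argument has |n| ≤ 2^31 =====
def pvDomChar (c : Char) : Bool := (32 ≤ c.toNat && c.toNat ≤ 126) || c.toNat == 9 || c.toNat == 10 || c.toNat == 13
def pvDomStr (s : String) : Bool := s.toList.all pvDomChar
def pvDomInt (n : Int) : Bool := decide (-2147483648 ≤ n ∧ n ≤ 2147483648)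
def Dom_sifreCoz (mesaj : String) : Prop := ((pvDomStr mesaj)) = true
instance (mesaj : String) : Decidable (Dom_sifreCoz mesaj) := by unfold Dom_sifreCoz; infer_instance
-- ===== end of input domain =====

-- B replaces A's index cursor + nested digit-collecting while-loop by one buffered
-- for-each pass (digit run buffer flushed reversed on each non-digit and at the end).

-- ===== PORT A =====
-- chr((ord(karakter) - ord('a') - 5) % 26 + ord('a'))  (shared decode of one letter)
def pvShift (c : Char) : Char :=
  Char.ofNat ((PySem.Int.mod ((c.toNat : Int) - 97 - 5) 26 + 97).toNat)

-- inner while-loop of A: collects the digit run into sayi, returns (sayi, rest)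
def sifreCozCollect (sayi : List Char) : List Char → List Char × List Char
  | [] => (sayi, [])
  | c :: rest =>
    if PySem.Chars.isdigit c then sifreCozCollect (sayi ++ [c]) rest else (sayi, c :: rest)

theorem sifreCozCollect_len (sayi xs) :
    (sifreCozCollect sayi xs).2.length ≤ xs.length := by
  induction xs generalizing sayi with
  | nil => simp [sifreCozCollect]
  | cons c rest ih =>
    simp only [sifreCozCollect]
    split
    · exact le_trans (ih _) (by simp)
    · simp

-- outer while-loop of A (sonuc accumulator, remaining characters)
def sifreCozLoop (sonuc : List Char) : List Char → List Char
  | [] => sonuc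
  | c :: rest =>
    if PySem.Chars.isalpha c then
      sifreCozLoop (sonuc ++ [pvShift c]) rest
    else if PySem.Chars.isdigit c then
      let pr := sifreCozCollect [c] rest
      sifreCozLoop (sonuc ++ pr.1.reverse) pr.2
    else
      sifreCozLoop (sonuc ++ [c]) rest
termination_by xs => xs.length
decreasing_by
  · simp
  · exact Nat.lt_succ_of_le (sifreCozCollect_len [c] rest)
  · simp

def sifreCoz (mesaj : String) : String := String.mk (sifreCozLoop [] mesaj.toList)

-- ===== PORT B =====
-- one step of B's for-loop over the characters: (parcalar, rakamlar) state
def sifreCozAltStep (st : List Char × List Char) (c : Char) : List Char × List Char :=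
  if PySem.Chars.isdigit c then
    (st.1, st.2 ++ [c])
  else
    (st.1 ++ st.2.reverse ++ [if PySem.Chars.isalpha c then pvShift c else c], [])

def sifreCoz_alt (mesaj : String) : String :=
  let st := mesaj.toList.foldl sifreCozAltStep ([], [])
  String.mk (st.1 ++ st.2.reverse)

-- ===== PRECONDITION & SPEC =====
def Spec_sifreCoz (mesaj : String) (out : String) : Prop := out = sifreCoz_alt mesaj
instance (mesaj : String) (out : String) : Decidable (Spec_sifreCoz mesaj out) := by unfold Spec_sifreCoz; infer_instance

-- ===== CLAIM (what is proved, stated in full; the proofs are below) =====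
def Claim_equal_sifreCoz : Prop := ∀ (mesaj : String), Dom_sifreCoz mesaj → Spec_sifreCoz mesaj (sifreCoz mesaj)

-- ===== LEMMAS AND PROOFS =====
-- flattened result of B's fold from an arbitrary state
def pvAltRun (p r xs : List Char) : List Char :=
  let st := xs.foldl sifreCozAltStep (p, r)
  st.1 ++ st.2.reverse

theorem pvAltRun_shift (xs p₀ p r : List Char) :
    pvAltRun (p₀ ++ p) r xs = p₀ ++ pvAltRun p r xs := by
  induction xs generalizing p r with
  | nil => simp [pvAltRun]
  | cons c rest ih =>
    simp only [pvAltRun, List.foldl_cons, sifreCozAltStep] at *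
    split
    · exact ih p (r ++ [c])
    · rw [show (p₀ ++ p) ++ r.reverse ++ [if PySem.Chars.isalpha c then pvShift c else c]
            = p₀ ++ (p ++ r.reverse ++ [if PySem.Chars.isalpha c then pvShift c else c]) by
          simp [List.append_assoc]]
      exact ih _ []

theorem pvAltRun_nondigit (c : Char) (rest : List Char)
    (h : PySem.Chars.isdigit c = false) :
    pvAltRun [] [] (c :: rest)
      = [if PySem.Chars.isalpha c then pvShift c else c] ++ pvAltRun [] [] rest := by
  have h1 : pvAltRun [] [] (c :: rest)
      = pvAltRun [if PySem.Chars.isalpha c then pvShift c else c] [] rest := by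
    simp [pvAltRun, sifreCozAltStep, h]
  rw [h1]
  simpa using pvAltRun_shift rest [if PySem.Chars.isalpha c then pvShift c else c] [] []

theorem pvAltRun_digitrun (xs r : List Char) :
    pvAltRun [] r xs
      = (sifreCozCollect r xs).1.reverse ++ pvAltRun [] [] (sifreCozCollect r xs).2 := by
  induction xs generalizing r with
  | nil => simp [pvAltRun, sifreCozCollect]
  | cons c rest ih =>
    by_cases h : PySem.Chars.isdigit c = true
    · simp only [pvAltRun, List.foldl_cons, sifreCozAltStep, h, if_true, sifreCozCollect] at *
      exact ih (r ++ [c])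
    · simp only [Bool.not_eq_true] at h
      have h1 : pvAltRun [] r (c :: rest)
          = pvAltRun (r.reverse ++ [if PySem.Chars.isalpha c then pvShift c else c]) [] rest := by
        simp [pvAltRun, sifreCozAltStep, h]
      have h2 : pvAltRun [if PySem.Chars.isalpha c then pvShift c else c] [] rest
          = [if PySem.Chars.isalpha c then pvShift c else c] ++ pvAltRun [] [] rest := by
        simpa using pvAltRun_shift rest [if PySem.Chars.isalpha c then pvShift c else c] [] []
      rw [h1, pvAltRun_shift rest r.reverse [if PySem.Chars.isalpha c then pvShift c else c] [],
        h2, ← pvAltRun_nondigit c rest h]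
      simp [sifreCozCollect, h]

theorem pv_alpha_not_digit (c : Char) (h : PySem.Chars.isalpha c = true) :
    PySem.Chars.isdigit c = false := by
  simp only [PySem.Chars.isalpha, PySem.Chars.isupper, PySem.Chars.islower, PySem.Chars.isdigit,
    Bool.or_eq_true, Bool.and_eq_true, decide_eq_true_eq, Char.le_def, UInt32.le_iff_toNat_le,
    Bool.and_eq_false_iff, decide_eq_false_iff_not, not_le] at *
  have e0 : '0'.val.toNat = 48 := rfl
  have e9 : '9'.val.toNat = 57 := rfl
  have eA : 'A'.val.toNat = 65 := rfl
  have eZ : 'Z'.val.toNat = 90 := rfl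
  have ea : 'a'.val.toNat = 97 := rfl
  have ez : 'z'.val.toNat = 122 := rfl
  omega

theorem sifreCozLoop_eq (xs sonuc : List Char) :
    sifreCozLoop sonuc xs = sonuc ++ pvAltRun [] [] xs := by
  induction hn : xs.length using Nat.strong_induction_on generalizing xs sonuc with
  | _ n ih =>
  cases xs with
  | nil => simp [sifreCozLoop, pvAltRun]
  | cons c rest =>
    by_cases ha : PySem.Chars.isalpha c = true
    · have hd := pv_alpha_not_digit c ha
      rw [sifreCozLoop, if_pos ha,
        ih rest.length (by simp at hn; omega) rest _ rfl,
        pvAltRun_nondigit c rest hd]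
      simp [ha, List.append_assoc]
    · simp only [Bool.not_eq_true] at ha
      by_cases hd : PySem.Chars.isdigit c = true
      · rw [sifreCozLoop, if_neg (by simp [ha]), if_pos hd]
        have hlen := sifreCozCollect_len [c] rest
        rw [ih (sifreCozCollect [c] rest).2.length (by simp at hn; omega) _ _ rfl]
        have : pvAltRun [] [] (c :: rest) = pvAltRun [] [c] rest := by
          simp [pvAltRun, sifreCozAltStep, hd]
        rw [this, pvAltRun_digitrun rest [c], List.append_assoc]
      · simp only [Bool.not_eq_true] at hd
        rw [sifreCozLoop, if_neg (by simp [ha]), if_neg (by simp [hd]),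
          ih rest.length (by simp at hn; omega) rest _ rfl,
          pvAltRun_nondigit c rest hd]
        simp [ha, List.append_assoc]

-- ===== VERDICT (by name: the statement is the Claim_ definition above) =====
theorem sifreCoz_spec : Claim_equal_sifreCoz := by
  intro mesaj _
  unfold Spec_sifreCoz sifreCoz sifreCoz_alt
  rw [sifreCozLoop_eq]
  rfl
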